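-- pv_equiv track=rewrite | github.com/Pranshugoyal/algo-ds-practice | python/Recursion.py | optimalKeys
-- ===== SOURCE A (Python) =====
-- import functools
--
-- def optimalKeys(N):
-- 	@functools.lru_cache(maxsize=None)
-- 	def keysUtil(printed, selected, clipboard, keyStrokesLeft) -> int:
-- 		if keyStrokesLeft == 0:
-- 			return printed
--
-- 		typeA = keysUtil(printed+1, 0, clipboard, keyStrokesLeft-1)
-- 		selectText = keysUtil(printed, printed, clipboard, keyStrokesLeft-1)
-- 		copyText = keysUtil(printed, 0, selected, keyStrokesLeft-1)
-- 		pasteClipboard = keysUtil(printed+clipboard, 0, clipboard, keyStrokesLeft-1)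
--
-- 		return max(typeA, pasteClipboard, copyText, selectText)
--
-- 	@functools.lru_cache(maxsize=None)
-- 	def keysUtilIter(n):
-- 		if n <= 6:
-- 			return n
--
-- 		maxA = 0
-- 		for i in range(n-3, -1, -1):
-- 			maxA = max(maxA, keysUtilIter(i)*(n-i-1))
-- 		return maxA
--
-- 	return keysUtilIter(N)
-- ===== SOURCE B (Python) =====
-- def optimalKeys(N):
--     # Bottom-up O(N): only the last four breakpoints (paste multipliers 2..5)
--     # can be optimal, so keep a rolling window of the six latest values.
--     if N <= 6:
--         return N
--     w = (1, 2, 3, 4, 5, 6)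
--     for _ in range(7, N + 1):
--         f = max(w[3] * 2, w[2] * 3, w[1] * 4, w[0] * 5)
--         w = (w[1], w[2], w[3], w[4], w[5], f)
--     return w[5]
-- ===== Notes on version B (the rewrite author's own statement) =====
-- stated objective: faster
-- what changed: Replaces the memoized recursion that scans every breakpoint i in range(n-3,-1,-1) with an iterative bottom-up pass keeping a rolling window of the six latest values, using the proved fact that only the last four breakpoints (paste multipliers 2..5) can be optimal.
import Mathlib
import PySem

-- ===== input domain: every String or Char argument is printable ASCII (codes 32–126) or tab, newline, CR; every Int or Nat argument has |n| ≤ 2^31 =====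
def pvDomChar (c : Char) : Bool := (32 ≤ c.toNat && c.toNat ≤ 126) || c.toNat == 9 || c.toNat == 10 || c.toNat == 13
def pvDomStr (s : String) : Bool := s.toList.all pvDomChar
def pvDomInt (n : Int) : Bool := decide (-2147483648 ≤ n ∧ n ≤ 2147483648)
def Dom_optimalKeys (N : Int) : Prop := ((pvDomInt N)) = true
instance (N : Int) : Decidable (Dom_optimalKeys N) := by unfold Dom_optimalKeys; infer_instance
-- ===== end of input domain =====

-- B replaces A's quadratic memoized recursion (trying every breakpoint i) by a
-- linear bottom-up scan keeping only the six latest values, since only the last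
-- four breakpoints (paste multipliers 2..5) can be optimal.

-- ===== PORT A =====
-- keysUtilIter is decorated with functools.lru_cache: it is ported together with its
-- memo table, built in ascending argument order (the cached recursion computes exactly
-- these entries; each entry is the verbatim body: base case n ≤ 6, else the loop
-- 'for i in range(n-3, -1, -1)' = (List.range (n-2)).reverse, accumulator maxA from 0,
-- reading the cached values keysUtilIter(i) from the table).
def buildK : Nat → List Int
  | 0 => [0]
  | n + 1 =>
      let t := buildK n
      t ++ [ if n + 1 ≤ 6 then ((n + 1 : Nat) : Int)
             else ((List.range (n + 1 - 2)).reverse).foldl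
               (fun maxA i => max maxA (t.getD i 0 * (((n + 1 : Nat) : Int) - (i : Int) - 1))) 0 ]

-- The top-level call: keysUtilIter(N) returns N itself whenever N ≤ 6 (including
-- negative N); otherwise N ≥ 7 and the cached value at N is returned.
def optimalKeys (N : Int) : Int :=
  if N ≤ 6 then N else (buildK N.toNat).getD N.toNat 0

-- ===== PORT B =====
-- Transliteration of Source B: rolling window w of the six latest values, one fold
-- over range(7, N+1); the loop body ignores the index.
def optimalKeys_alt (N : Int) : Int :=
  if N ≤ 6 then N
  else
    let w :=
      (PySem.List.pyRange 7 (N + 1) 1).foldl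
        (fun (w : Int × Int × Int × Int × Int × Int) _ =>
          let f := max (max (max (w.2.2.2.1 * 2) (w.2.2.1 * 3)) (w.2.1 * 4)) (w.1 * 5)
          (w.2.1, w.2.2.1, w.2.2.2.1, w.2.2.2.2.1, w.2.2.2.2.2, f))
        (1, 2, 3, 4, 5, 6)
    w.2.2.2.2.2

-- ===== PRECONDITION & SPEC =====
-- Python A's inner keysUtilIter recurses with depth growing linearly in N, so for
-- large N it raises RecursionError (under CPython's default recursion limit the
-- first failure sits near N ≈ 1500; the exact point depends on interpreter stack
-- state). Pre_ keeps the range that is safe under the default limit.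
def Pre_optimalKeys (N : Int) : Prop := N < 1498
instance (N : Int) : Decidable (Pre_optimalKeys N) := by unfold Pre_optimalKeys; infer_instance
def pvWitness_optimalKeys : Int := (10)

def Spec_optimalKeys (N : Int) (out : Int) : Prop := out = optimalKeys_alt N
instance (N : Int) (out : Int) : Decidable (Spec_optimalKeys N out) := by unfold Spec_optimalKeys; infer_instance

-- ===== CLAIM (what is proved, stated in full; the proofs are below) =====
def Claim_equal_optimalKeys : Prop := ∀ (N : Int), Dom_optimalKeys N → Pre_optimalKeys N → Spec_optimalKeys N (optimalKeys N)

-- ===== LEMMAS AND PROOFS =====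

-- the mathematical value of the cached recursion (proof-side model of keysUtilIter)
def kRec (n : Nat) : Int :=
  if n ≤ 6 then (n : Int)
  else
    ((List.range (n - 2)).reverse.attach).foldl
      (fun maxA i => max maxA (kRec i.1 * ((n : Int) - (i.1 : Int) - 1))) 0
termination_by n
decreasing_by
  have : i.1 ∈ List.range (n - 2) := List.mem_reverse.mp i.2
  have := List.mem_range.mp this
  omega

theorem kRec_base (n : Nat) (h : n ≤ 6) : kRec n = (n : Int) := by
  rw [kRec]; simp [h]

theorem kRec_eq (n : Nat) (h : ¬ n ≤ 6) :
    kRec n = ((List.range (n - 2)).reverse).foldl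
      (fun maxA i => max maxA (kRec i * ((n : Int) - (i : Int) - 1))) 0 := by
  rw [kRec]; simp only [h, if_false]
  exact List.foldl_attach (f := fun maxA i => max maxA (kRec i * ((n : Int) - (i : Int) - 1)))

theorem buildK_length (n : Nat) : (buildK n).length = n + 1 := by
  induction n with
  | zero => simp [buildK]
  | succ n ih => simp [buildK, ih]

theorem buildK_getD (n : Nat) : ∀ m ≤ n, (buildK n).getD m 0 = kRec m := by
  induction n with
  | zero =>
    intro m hm
    interval_cases m
    rw [kRec]; simp [buildK]
  | succ n ih =>
    intro m hm
    rcases Nat.lt_or_ge m (n + 1) with hlt | hge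
    · have hm' : m < (buildK n).length := by rw [buildK_length]; omega
      rw [buildK]
      rw [List.getD_append _ _ _ _ hm']
      exact ih m (by omega)
    · have hm1 : m = n + 1 := by omega
      subst hm1
      rw [buildK]
      have hL : (buildK n).length = n + 1 := buildK_length n
      have hget : ((buildK n) ++ [ if n + 1 ≤ 6 then ((n + 1 : Nat) : Int)
             else ((List.range (n + 1 - 2)).reverse).foldl
               (fun maxA i => max maxA ((buildK n).getD i 0 * (((n + 1 : Nat) : Int) - (i : Int) - 1))) 0 ]).getD (n + 1) 0
          = if n + 1 ≤ 6 then ((n + 1 : Nat) : Int)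
             else ((List.range (n + 1 - 2)).reverse).foldl
               (fun maxA i => max maxA ((buildK n).getD i 0 * (((n + 1 : Nat) : Int) - (i : Int) - 1))) 0 := by
        rw [List.getD_eq_getElem?_getD, List.getElem?_append_right (by omega), hL]
        simp
      rw [hget]
      by_cases hb : n + 1 ≤ 6
      · rw [if_pos hb, kRec_base (n + 1) hb]
      · rw [if_neg hb, kRec_eq (n + 1) hb]
        apply PySem.List.foldl_congr_mem
        intro acc i hi
        have hi' : i < n + 1 - 2 := List.mem_range.mp (List.mem_reverse.mp hi)
        rw [ih i (by omega)]


-- the loop body of B, as a standalone step function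
def stepB (w : Int × Int × Int × Int × Int × Int) : Int × Int × Int × Int × Int × Int :=
  let f := max (max (max (w.2.2.2.1 * 2) (w.2.2.1 * 3)) (w.2.1 * 4)) (w.1 * 5)
  (w.2.1, w.2.2.1, w.2.2.2.1, w.2.2.2.2.1, w.2.2.2.2.2, f)

-- the restricted four-term maximum B computes at each step
def winMax (n : Nat) : Int :=
  max (max (max (kRec (n - 3) * 2) (kRec (n - 4) * 3))
    (kRec (n - 5) * 4)) (kRec (n - 6) * 5)

theorem foldl_max_ge_init {α : Type} (h : α → Int) (l : List α) (a : Int) :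
    a ≤ l.foldl (fun m x => max m (h x)) a := by
  induction l generalizing a with
  | nil => simp
  | cons y l ih => exact le_trans (le_max_left a (h y)) (ih _)

theorem foldl_max_ge_mem {α : Type} (h : α → Int) (l : List α) {x : α} :
    ∀ a : Int, x ∈ l → h x ≤ l.foldl (fun m x => max m (h x)) a := by
  induction l with
  | nil => intro a hx; cases hx
  | cons y l ih =>
    intro a hx
    rcases List.mem_cons.mp hx with rfl | hx
    · exact le_trans (le_max_right a (h x)) (foldl_max_ge_init h l _)
    · exact ih _ hx

theorem foldl_max_le {α : Type} (h : α → Int) (l : List α) (b : Int) :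
    ∀ a : Int, a ≤ b → (∀ x ∈ l, h x ≤ b) →
      l.foldl (fun m x => max m (h x)) a ≤ b := by
  induction l with
  | nil => intro a ha _; exact ha
  | cons y l ih =>
    intro a ha hb
    exact ih _ (max_le ha (hb y List.mem_cons_self))
      (fun x hx => hb x (List.mem_cons_of_mem _ hx))

theorem kRec_nonneg (n : Nat) : 0 ≤ kRec n := by
  by_cases h : n ≤ 6
  · rw [kRec_base n h]; exact Int.natCast_nonneg n
  · rw [kRec_eq n h]; exact foldl_max_ge_init _ _ 0

-- every admissible term of A's loop is ≤ the whole loop's result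
theorem kRec_ge_term (n i : Nat) (h7 : 7 ≤ n) (hi : i ≤ n - 3) :
    kRec i * ((n : Int) - (i : Int) - 1) ≤ kRec n := by
  rw [kRec_eq n (by omega)]
  exact foldl_max_ge_mem _ _ 0 (List.mem_reverse.mpr (List.mem_range.mpr (by omega)))

-- three more keystrokes at least double the output
theorem kRec_double (i : Nat) : 2 * kRec i ≤ kRec (i + 3) := by
  by_cases h : i ≤ 3
  · rw [kRec_base i (by omega), kRec_base (i + 3) (by omega)]
    push_cast; omega
  · have h2 := kRec_ge_term (i + 3) i (by omega) (by omega)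
    have hc : ((i + 3 : Nat) : Int) - (i : Int) - 1 = 2 := by push_cast; ring
    rw [hc] at h2; omega

-- the four window terms are each ≤ winMax
theorem win2_le (n : Nat) : kRec (n - 3) * 2 ≤ winMax n :=
  le_max_of_le_left (le_max_of_le_left (le_max_left _ _))
theorem win3_le (n : Nat) : kRec (n - 4) * 3 ≤ winMax n :=
  le_max_of_le_left (le_max_of_le_left (le_max_right _ _))
theorem win4_le (n : Nat) : kRec (n - 5) * 4 ≤ winMax n :=
  le_max_of_le_left (le_max_right _ _)
theorem win5_le (n : Nat) : kRec (n - 6) * 5 ≤ winMax n :=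
  le_max_right _ _

-- every term of A's full loop is dominated by one of the last four
theorem term_le_winMax (n : Nat) (h7 : 7 ≤ n) :
    ∀ k i, i ≤ n - 3 → n - 3 - i = k →
      kRec i * ((n : Int) - (i : Int) - 1) ≤ winMax n := by
  intro k
  induction k using Nat.strong_induction_on with
  | _ k ih =>
    intro i hi hk
    by_cases hlast : n - 6 ≤ i
    · -- i ∈ {n-3, n-4, n-5, n-6}: the term is one of winMax's components
      have hcases : i = n - 3 ∨ i = n - 4 ∨ i = n - 5 ∨ i = n - 6 := by omega
      rcases hcases with rfl | rfl | rfl | rfl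
      · have e : ((n : Int) - ((n - 3 : Nat) : Int) - 1) = 2 := by omega
        rw [e]; exact win2_le n
      · have e : ((n : Int) - ((n - 4 : Nat) : Int) - 1) = 3 := by omega
        rw [e]; exact win3_le n
      · have e : ((n : Int) - ((n - 5 : Nat) : Int) - 1) = 4 := by omega
        rw [e]; exact win4_le n
      · have e : ((n : Int) - ((n - 6 : Nat) : Int) - 1) = 5 := by omega
        rw [e]; exact win5_le n
    · -- i ≤ n-7: the term at breakpoint i+3 dominates the one at i
      have hnn := kRec_nonneg i
      have hd := kRec_double i
      have hm : (i : Int) + 7 ≤ (n : Int) := by omega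
      have key1 : kRec i * ((n : Int) - (i : Int) - 1)
          ≤ 2 * kRec i * ((n : Int) - (i : Int) - 4) := by
        nlinarith [mul_nonneg hnn (show (0 : Int) ≤ (n : Int) - (i : Int) - 7 by omega)]
      have key2 : 2 * kRec i * ((n : Int) - (i : Int) - 4)
          ≤ kRec (i + 3) * ((n : Int) - (i : Int) - 4) :=
        mul_le_mul_of_nonneg_right hd (by omega)
      have hc : ((n : Int) - ((i + 3 : Nat) : Int) - 1) = (n : Int) - (i : Int) - 4 := by
        push_cast; ring
      have tail := ih (k - 3) (by omega) (i + 3) (by omega) (by omega)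
      rw [hc] at tail
      omega

-- the key theorem: for n ≥ 7 the full maximum equals the four-term window maximum
theorem kRec_window (n : Nat) (h7 : 7 ≤ n) : kRec n = winMax n := by
  apply le_antisymm
  · rw [kRec_eq n (by omega)]
    apply foldl_max_le
    · exact le_trans (mul_nonneg (kRec_nonneg (n - 3)) (by norm_num)) (win2_le n)
    · intro i hi
      have hi' : i ≤ n - 3 := by
        have := List.mem_range.mp (List.mem_reverse.mp hi); omega
      exact term_le_winMax n h7 _ i hi' rfl
  · have t2 := kRec_ge_term n (n - 3) h7 (by omega)
    have t3 := kRec_ge_term n (n - 4) h7 (by omega)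
    have t4 := kRec_ge_term n (n - 5) h7 (by omega)
    have t5 := kRec_ge_term n (n - 6) h7 (by omega)
    have e2 : ((n : Int) - ((n - 3 : Nat) : Int) - 1) = 2 := by omega
    have e3 : ((n : Int) - ((n - 4 : Nat) : Int) - 1) = 3 := by omega
    have e4 : ((n : Int) - ((n - 5 : Nat) : Int) - 1) = 4 := by omega
    have e5 : ((n : Int) - ((n - 6 : Nat) : Int) - 1) = 5 := by omega
    rw [e2] at t2; rw [e3] at t3; rw [e4] at t4; rw [e5] at t5
    unfold winMax
    exact max_le (max_le (max_le t2 t3) t4) t5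

-- B's fold ignores the list elements: it is an iterate of stepB
theorem foldl_const_iterate {α : Type} (l : List α)
    (w : Int × Int × Int × Int × Int × Int) :
    l.foldl (fun w _ => stepB w) w = stepB^[l.length] w := by
  induction l generalizing w with
  | nil => simp
  | cons y l ih => simp [List.foldl_cons, ih, Function.iterate_succ_apply]

-- the loop invariant: after j iterations the window holds the six latest values
theorem stepB_iterate (j : Nat) :
    stepB^[j] (1, 2, 3, 4, 5, 6) =
      (kRec (j + 1), kRec (j + 2), kRec (j + 3),
       kRec (j + 4), kRec (j + 5), kRec (j + 6)) := by
  induction j with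
  | zero =>
    simp [kRec_base 1 (by omega), kRec_base 2 (by omega),
      kRec_base 3 (by omega), kRec_base 4 (by omega),
      kRec_base 5 (by omega), kRec_base 6 (by omega)]
  | succ j ih =>
    rw [Function.iterate_succ_apply', ih]
    have hw : kRec (j + 7) =
        max (max (max (kRec (j + 4) * 2) (kRec (j + 3) * 3))
          (kRec (j + 2) * 4)) (kRec (j + 1) * 5) := by
      rw [kRec_window (j + 7) (by omega)]
      unfold winMax
      have e3 : j + 7 - 3 = j + 4 := by omega
      have e4 : j + 7 - 4 = j + 3 := by omega
      have e5 : j + 7 - 5 = j + 2 := by omega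
      have e6 : j + 7 - 6 = j + 1 := by omega
      rw [e3, e4, e5, e6]
    simp only [stepB]
    have h2 : j + 1 + 1 = j + 2 := by omega
    have h3 : j + 1 + 2 = j + 3 := by omega
    have h4 : j + 1 + 3 = j + 4 := by omega
    have h5 : j + 1 + 4 = j + 5 := by omega
    have h6 : j + 1 + 5 = j + 6 := by omega
    have h7 : j + 1 + 6 = j + 7 := by omega
    rw [h2, h3, h4, h5, h6, h7, hw]

-- ===== VERDICT (by name: the statement is the Claim_ definition above) =====
theorem optimalKeys_spec : Claim_equal_optimalKeys := by
  intro N _ _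
  unfold Spec_optimalKeys optimalKeys optimalKeys_alt
  by_cases h : N ≤ 6
  · simp [h]
  · simp only [h, if_false]
    rw [buildK_getD N.toNat N.toNat (le_refl _)]
    have hfun : (fun (w : Int × Int × Int × Int × Int × Int) (_ : Int) =>
        let f := max (max (max (w.2.2.2.1 * 2) (w.2.2.1 * 3)) (w.2.1 * 4)) (w.1 * 5)
        (w.2.1, w.2.2.1, w.2.2.2.1, w.2.2.2.2.1, w.2.2.2.2.2, f)) =
        (fun w _ => stepB w) := rfl
    rw [hfun, foldl_const_iterate, PySem.List.length_pyRange_one]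
    have hlen : (N + 1 - 7).toNat = N.toNat - 6 := by omega
    rw [hlen, stepB_iterate (N.toNat - 6)]
    have h1 : N.toNat - 6 + 1 = N.toNat - 5 := by omega
    have h2 : N.toNat - 6 + 2 = N.toNat - 4 := by omega
    have h3 : N.toNat - 6 + 3 = N.toNat - 3 := by omega
    have h4 : N.toNat - 6 + 4 = N.toNat - 2 := by omega
    have h5 : N.toNat - 6 + 5 = N.toNat - 1 := by omega
    have h6 : N.toNat - 6 + 6 = N.toNat := by omega
    rw [h6]
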